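-- pv_equiv track=rewrite | github.com/linuxmint/cinnamon | files/usr/share/cinnamon/cinnamon-settings/modules/cs_backgrounds.py | getLocalWallpaperName
-- ===== SOURCE A (Python) =====
-- def getLocalWallpaperName(names, loc):
--     result = ""
--     mainLocFound = False
--     for wp in names:
--         wpLoc = wp[0]
--         wpName = wp[1]
--         if wpLoc == ("", ""):
--             if not mainLocFound:
--                 result = wpName
--         elif wpLoc[0] == loc[0]:
--             if wpLoc[1] == loc[1]:
--                 return wpName
--             elif wpLoc[1] == "":
--                 result = wpName
--                 mainLocFound = True
--     return result
-- ===== SOURCE B (Python) =====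
-- def getLocalWallpaperName(names, loc):
--     # Priority selection: first exact-locale match, else last language-only
--     # match, else last default ((,"") key) entry, else "".
--     exact = [name for (wpLoc, name) in names
--              if wpLoc != ("", "") and wpLoc[0] == loc[0] and wpLoc[1] == loc[1]]
--     if exact:
--         return exact[0]
--     lang = [name for (wpLoc, name) in names
--             if wpLoc != ("", "") and wpLoc[0] == loc[0] and wpLoc[1] == "" and loc[1] != ""]
--     if lang:
--         return lang[-1]
--     default = [name for (wpLoc, name) in names if wpLoc == ("", "")]
--     if default:
--         return default[-1]
--     return ""
-- ===== Notes on version B (the rewrite author's own statement) =====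
-- stated objective: simpler
-- what changed: Replaced A's single stateful scan threading a result string and a mainLocFound flag with explicit priority selection over three filtered candidate lists (first exact match, last language-only match, last default entry).
import Mathlib
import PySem

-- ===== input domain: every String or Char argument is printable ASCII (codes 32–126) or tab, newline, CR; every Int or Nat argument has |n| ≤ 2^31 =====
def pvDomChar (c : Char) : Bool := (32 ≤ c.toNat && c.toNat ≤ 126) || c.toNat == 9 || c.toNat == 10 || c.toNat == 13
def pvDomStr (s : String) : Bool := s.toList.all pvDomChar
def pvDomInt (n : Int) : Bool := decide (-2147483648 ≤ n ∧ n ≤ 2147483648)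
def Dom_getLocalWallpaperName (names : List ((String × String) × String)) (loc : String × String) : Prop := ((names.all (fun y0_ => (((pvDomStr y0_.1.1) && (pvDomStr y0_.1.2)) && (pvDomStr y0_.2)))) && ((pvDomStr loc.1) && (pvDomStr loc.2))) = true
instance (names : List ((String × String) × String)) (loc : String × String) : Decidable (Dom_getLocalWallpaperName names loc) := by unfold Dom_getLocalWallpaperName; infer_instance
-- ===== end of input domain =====

-- B replaces A's single flag-threaded scan by explicit priority selection over
-- three filtered candidate lists (simpler decomposition, same O(n) cost).

-- ===== PORT A =====
-- A's loop, threading (result, mainLocFound); early return modelled by returning wpName.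
def goA (loc : String × String) : List ((String × String) × String) → String → Bool → String
  | [], result, _ => result
  | wp :: rest, result, mainLocFound =>
    let wpLoc := wp.1
    let wpName := wp.2
    if wpLoc = ("", "") then
      goA loc rest (if mainLocFound then result else wpName) mainLocFound
    else if wpLoc.1 = loc.1 then
      if wpLoc.2 = loc.2 then wpName
      else if wpLoc.2 = "" then goA loc rest wpName true
      else goA loc rest result mainLocFound
    else goA loc rest result mainLocFound

def getLocalWallpaperName (names : List ((String × String) × String)) (loc : String × String) : String :=
  goA loc names "" false

-- ===== PORT B =====
def isExact (loc : String × String) (wp : (String × String) × String) : Bool :=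
  decide (wp.1 ≠ ("", "") ∧ wp.1.1 = loc.1 ∧ wp.1.2 = loc.2)

def isLangOnly (loc : String × String) (wp : (String × String) × String) : Bool :=
  decide (wp.1 ≠ ("", "") ∧ wp.1.1 = loc.1 ∧ wp.1.2 = "" ∧ loc.2 ≠ "")

def isDefault (wp : (String × String) × String) : Bool :=
  decide (wp.1 = ("", ""))

def getLocalWallpaperName_alt (names : List ((String × String) × String)) (loc : String × String) : String :=
  match ((names.filter (isExact loc)).map Prod.snd).head? with
  | some n => n
  | none =>
    match ((names.filter (isLangOnly loc)).map Prod.snd).getLast? with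
    | some n => n
    | none =>
      match ((names.filter isDefault).map Prod.snd).getLast? with
      | some n => n
      | none => ""

-- ===== PRECONDITION & SPEC =====
def Spec_getLocalWallpaperName (names : List ((String × String) × String)) (loc : String × String) (out : String) : Prop := out = getLocalWallpaperName_alt names loc
instance (names : List ((String × String) × String)) (loc : String × String) (out : String) : Decidable (Spec_getLocalWallpaperName names loc out) := by unfold Spec_getLocalWallpaperName; infer_instance

-- ===== CLAIM (what is proved, stated in full; the proofs are below) =====
def Claim_equal_getLocalWallpaperName : Prop := ∀ (names : List ((String × String) × String)) (loc : String × String), Dom_getLocalWallpaperName names loc → Spec_getLocalWallpaperName names loc (getLocalWallpaperName names loc)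

-- ===== LEMMAS AND PROOFS =====

-- Characterisation of A's loop in terms of B's three filtered lists, for arbitrary state.
def stateF (loc : String × String) (names : List ((String × String) × String))
    (result : String) (flag : Bool) : String :=
  match (names.filter (isExact loc)).head? with
  | some wp => wp.2
  | none =>
    match (names.filter (isLangOnly loc)).getLast? with
    | some wp => wp.2
    | none =>
      if flag then result
      else
        match (names.filter isDefault).getLast? with
        | some wp => wp.2
        | none => result

theorem stateF_cons_skip (loc k n rest result flag)
    (hex : isExact loc (k, n) = false) (hlg : isLangOnly loc (k, n) = false)
    (hdf : isDefault (k, n) = false) :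
    stateF loc ((k, n) :: rest) result flag = stateF loc rest result flag := by
  simp [stateF, hex, hlg, hdf]

theorem stateF_cons_exact (loc k n rest result flag)
    (hex : isExact loc (k, n) = true) :
    stateF loc ((k, n) :: rest) result flag = n := by
  simp [stateF, hex]

theorem stateF_cons_lang (loc k n rest result flag)
    (hex : isExact loc (k, n) = false) (hlg : isLangOnly loc (k, n) = true) :
    stateF loc ((k, n) :: rest) result flag = stateF loc rest n true := by
  simp only [stateF, List.filter_cons, hex, hlg, Bool.false_eq_true, if_false, if_true]
  cases (rest.filter (isExact loc)).head? with
  | some w => rfl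
  | none =>
    rw [List.getLast?_cons]
    cases (rest.filter (isLangOnly loc)).getLast? with
    | some w => rfl
    | none => rfl

theorem stateF_cons_default (loc k n rest result flag)
    (hex : isExact loc (k, n) = false) (hlg : isLangOnly loc (k, n) = false)
    (hdf : isDefault (k, n) = true) :
    stateF loc ((k, n) :: rest) result flag
      = stateF loc rest (if flag then result else n) flag := by
  simp only [stateF, List.filter_cons, hex, hlg, hdf, Bool.false_eq_true, if_false, if_true]
  cases (rest.filter (isExact loc)).head? with
  | some w => rfl
  | none =>
    cases (rest.filter (isLangOnly loc)).getLast? with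
    | some w => rfl
    | none =>
      cases flag with
      | true => rfl
      | false =>
        simp only [Bool.false_eq_true, if_false]
        rw [List.getLast?_cons]
        cases (rest.filter isDefault).getLast? with
        | some w => rfl
        | none => rfl

theorem goA_eq_stateF (loc : String × String) :
    ∀ (names : List ((String × String) × String)) (result : String) (flag : Bool),
      goA loc names result flag = stateF loc names result flag := by
  intro names
  induction names with
  | nil => intro result flag; simp [goA, stateF]
  | cons wp rest ih =>
    intro result flag
    obtain ⟨k, n⟩ := wp
    by_cases hd : k = ("", "")
    · have hex : isExact loc (k, n) = false := by simp [isExact, hd]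
      have hlg : isLangOnly loc (k, n) = false := by simp [isLangOnly, hd]
      have hdf : isDefault (k, n) = true := by simp [isDefault, hd]
      simp only [goA]
      rw [if_pos hd, ih, stateF_cons_default loc k n rest result flag hex hlg hdf]
    · by_cases h1 : k.1 = loc.1
      · by_cases h2 : k.2 = loc.2
        · have hex : isExact loc (k, n) = true := by simp [isExact, hd, h1, h2]
          simp only [goA]
          rw [if_neg hd, if_pos h1, if_pos h2, stateF_cons_exact loc k n rest result flag hex]
        · by_cases h3 : k.2 = ""
          · have hex : isExact loc (k, n) = false := by simp [isExact, h2]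
            have hloc2 : loc.2 ≠ "" := by rw [h3] at h2; exact fun h => h2 h.symm
            have hlg : isLangOnly loc (k, n) = true := by
              simp [isLangOnly, hd, h1, h3, hloc2]
            simp only [goA]
            rw [if_neg hd, if_pos h1, if_neg h2, if_pos h3, ih,
              stateF_cons_lang loc k n rest result flag hex hlg]
          · have hex : isExact loc (k, n) = false := by simp [isExact, h2]
            have hlg : isLangOnly loc (k, n) = false := by simp [isLangOnly, h3]
            have hdf : isDefault (k, n) = false := by simp [isDefault, hd]
            simp only [goA]
            rw [if_neg hd, if_pos h1, if_neg h2, if_neg h3, ih,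
              stateF_cons_skip loc k n rest result flag hex hlg hdf]
      · have hex : isExact loc (k, n) = false := by simp [isExact, h1]
        have hlg : isLangOnly loc (k, n) = false := by simp [isLangOnly, h1]
        have hdf : isDefault (k, n) = false := by simp [isDefault, hd]
        simp only [goA]
        rw [if_neg hd, if_neg h1, ih,
          stateF_cons_skip loc k n rest result flag hex hlg hdf]

theorem alt_eq_stateF (names : List ((String × String) × String)) (loc : String × String) :
    getLocalWallpaperName_alt names loc = stateF loc names "" false := by
  simp only [getLocalWallpaperName_alt, stateF, List.head?_map, List.getLast?_map,
    Bool.false_eq_true, if_false]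
  cases (names.filter (isExact loc)).head? with
  | some w => rfl
  | none =>
    cases (names.filter (isLangOnly loc)).getLast? with
    | some w => rfl
    | none =>
      cases (names.filter isDefault).getLast? with
      | some w => rfl
      | none => rfl

-- ===== VERDICT (by name: the statement is the Claim_ definition above) =====
theorem getLocalWallpaperName_spec : Claim_equal_getLocalWallpaperName := by
  intro names loc _
  unfold Spec_getLocalWallpaperName getLocalWallpaperName
  rw [goA_eq_stateF, alt_eq_stateF]
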